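-- pv_equiv track=rewrite | github.com/IBMSPadmin/spadmin | completer-poc/utilities.py | regexpgenerator
-- ===== SOURCE A (Python) =====
-- def regexpgenerator(regexp):
--
--     savelastchar = ''
--     if regexp[ -1 ] == '=':
--         savelastchar = regexp[ -1 ] + '(?!.*\w+\s)'
--         regexp = regexp[ : -1 ]
--     # # save v2 with regexp pattern
--     # match = search( '(=.*)$', regexp )
--     # if match:
--     #   savelastchar = match[ 1 ]
--     #   regexp = regexp.replace( match[ 1 ], '' )
--
--     result = ''
--     for part in regexp.split():
--
--         if part[ 0 ].isupper():
--
--             tmpregexp = part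
--             tmpstring = part
--             for x in part:
--                 if tmpstring[ -1 ].isupper():
--                     break
--                 tmpstring = part[ 0:len( tmpstring ) - 1 ]
--                 tmpregexp += '|' + tmpstring
--
--             result += '(' + tmpregexp + ')'
--
--         else:
--             result += '(' + part + ')'
--
--         result += '\s+'
--
--     return result[ :-3 ] + savelastchar
-- ===== SOURCE B (Python) =====
-- def regexpgenerator(regexp):
--
--     savelastchar = ''
--     if regexp[-1] == '=':
--         savelastchar = regexp[-1] + '(?!.*\\w+\\s)'
--         regexp = regexp[:-1]
--
--     groups = []
--     for part in regexp.split():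
--         if part[0].isupper():
--             # first pass: position of the LAST uppercase character of the word
--             last_up = len(part) - 1
--             while not part[last_up].isupper():
--                 last_up -= 1
--             # second pass: prefixes of decreasing length, down to that position
--             alts = '|'.join(part[:k] for k in range(len(part), last_up, -1))
--             groups.append('(' + alts + ')')
--         else:
--             groups.append('(' + part + ')')
--
--     return '\\s+'.join(groups) + savelastchar
-- ===== Notes on version B (the rewrite author's own statement) =====
-- stated objective: alternative
-- what changed: The interleaved shorten-tmpstring-and-append loop per word is replaced by a two-pass decomposition: first scan for the index of the last uppercase character, then emit the descending prefixes down to it joined on the pipe separator; the final string is assembled by joining a list of groups on the three-character whitespace separator instead of append-then-trim.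
import Mathlib
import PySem

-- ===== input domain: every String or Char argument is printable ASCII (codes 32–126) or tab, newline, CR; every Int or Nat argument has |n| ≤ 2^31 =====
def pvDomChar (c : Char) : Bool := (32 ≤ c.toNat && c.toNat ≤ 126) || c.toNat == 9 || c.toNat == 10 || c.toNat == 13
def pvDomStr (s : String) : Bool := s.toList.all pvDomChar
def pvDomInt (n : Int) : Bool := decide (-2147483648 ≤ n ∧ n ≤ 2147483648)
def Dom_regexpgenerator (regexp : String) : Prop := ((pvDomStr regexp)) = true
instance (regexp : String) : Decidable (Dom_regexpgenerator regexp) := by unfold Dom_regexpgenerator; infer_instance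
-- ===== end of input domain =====

-- B replaces A's interleaved shorten-and-check loop by a two-pass decomposition (find the last
-- uppercase position, then join the descending prefixes) and assembles the result by joining a
-- list of groups on the separator instead of append-then-trim; objective: alternative decomposition.

-- ===== PORT A =====
-- inner 'for x in part:' loop of A; state = (tmpregexp, tmpstring), driven by the chars of part
def pvLoopA (part : List Char) : List Char → List Char → List Char → List Char
  | [], tr, _ => tr
  | _ :: fuel, tr, ts =>
    if PySem.Chars.isupper (PySem.List.pyGetD ts (-1) ' ') then tr
    else
      let ts' := PySem.List.slice part (some 0) (some ((ts.length : Int) - 1))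
      pvLoopA part fuel (tr ++ '|' :: ts') ts'

-- body of A's 'for part in regexp.split():' (the part appended to result, without the '\s+')
def pvGroupA (part : List Char) : List Char :=
  if PySem.Chars.isupper (PySem.List.pyGetD part 0 ' ') then
    '(' :: (pvLoopA part part part part ++ [')'])
  else
    '(' :: (part ++ [')'])

def pvCoreA (cs : List Char) : List Char :=
  let savelastchar : List Char :=
    if PySem.List.pyGetD cs (-1) ' ' = '=' then
      PySem.List.pyGetD cs (-1) ' ' :: ['(', '?', '!', '.', '*', '\\', 'w', '+', '\\', 's', ')']
    else []
  let cs' := if PySem.List.pyGetD cs (-1) ' ' = '=' then PySem.List.slice cs none (some (-1)) else cs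
  let result := (PySem.Chars.split₀ cs').foldl
    (fun res part => res ++ pvGroupA part ++ ['\\', 's', '+']) []
  PySem.List.slice result none (some (-3)) ++ savelastchar

def regexpgenerator (regexp : String) : String := String.ofList (pvCoreA regexp.toList)

-- ===== PORT B =====
-- B's 'while not part[last_up].isupper(): last_up -= 1' as a decrement recursion on the index
-- (only reached when part[0] is uppercase, so the scan stops at index 0 at the latest)
def pvLastUp (part : List Char) : Nat → Nat
  | 0 => 0
  | m + 1 =>
    if PySem.Chars.isupper (PySem.List.pyGetD part ((m : Int) + 1) ' ') then m + 1
    else pvLastUp part m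

def pvGroupB (part : List Char) : List Char :=
  if PySem.Chars.isupper (PySem.List.pyGetD part 0 ' ') then
    let lastUp := pvLastUp part (part.length - 1)
    let alts := PySem.Chars.join ['|']
      ((PySem.List.pyRange (part.length : Int) (lastUp : Int) (-1)).map
        (fun k => PySem.List.slice part none (some k)))
    '(' :: (alts ++ [')'])
  else
    '(' :: (part ++ [')'])

def pvCoreB (cs : List Char) : List Char :=
  let savelastchar : List Char :=
    if PySem.List.pyGetD cs (-1) ' ' = '=' then
      PySem.List.pyGetD cs (-1) ' ' :: ['(', '?', '!', '.', '*', '\\', 'w', '+', '\\', 's', ')']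
    else []
  let cs' := if PySem.List.pyGetD cs (-1) ' ' = '=' then PySem.List.slice cs none (some (-1)) else cs
  PySem.Chars.join ['\\', 's', '+'] ((PySem.Chars.split₀ cs').map pvGroupB) ++ savelastchar

def regexpgenerator_alt (regexp : String) : String := String.ofList (pvCoreB regexp.toList)

-- ===== PRECONDITION & SPEC =====
-- Pre_ excludes only the empty string, on which A (regexp[-1]) raises IndexError (B raises too).
def Pre_regexpgenerator (regexp : String) : Prop := regexp ≠ ""
instance (regexp : String) : Decidable (Pre_regexpgenerator regexp) := by
  unfold Pre_regexpgenerator; infer_instance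

def pvWitness_regexpgenerator : String := "Query aBC="

def Spec_regexpgenerator (regexp : String) (out : String) : Prop := out = regexpgenerator_alt regexp
instance (regexp : String) (out : String) : Decidable (Spec_regexpgenerator regexp out) := by
  unfold Spec_regexpgenerator; infer_instance

-- ===== CLAIM (what is proved, stated in full; the proofs are below) =====
def Claim_equal_regexpgenerator : Prop := ∀ (regexp : String), Dom_regexpgenerator regexp → Pre_regexpgenerator regexp → Spec_regexpgenerator regexp (regexpgenerator regexp)

-- ===== LEMMAS AND PROOFS =====

-- the common tail both inner computations append after the full word:
-- '|' ++ part[:m-1] ++ '|' ++ part[:m-2] ++ … ++ '|' ++ part[:L+1]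
def pvAltTail (cs : List Char) (L : Nat) : Nat → List Char
  | 0 => []
  | m + 1 => if m + 1 ≤ L + 1 then [] else ('|' :: cs.take m) ++ pvAltTail cs L m

lemma pvLastUp_le (cs : List Char) (m : Nat) : pvLastUp cs m ≤ m := by
  induction m with
  | zero => simp [pvLastUp]
  | succ m ih => simp only [pvLastUp]; split <;> omega

lemma pvLastUp_upper (cs : List Char) (m : Nat)
    (h0 : PySem.Chars.isupper (cs.getD 0 ' ') = true) :
    PySem.Chars.isupper (cs.getD (pvLastUp cs m) ' ') = true := by
  induction m with
  | zero => simpa [pvLastUp] using h0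
  | succ m ih =>
    simp only [pvLastUp]
    split
    · rename_i h
      rw [show ((m : Int) + 1) = ((m + 1 : Nat) : Int) by push_cast; ring,
        PySem.List.pyGetD_natCast] at h
      exact h
    · exact ih

lemma pvLastUp_max (cs : List Char) (m j : Nat) (hj : pvLastUp cs m < j) (hjm : j ≤ m) :
    PySem.Chars.isupper (cs.getD j ' ') = false := by
  induction m with
  | zero => omega
  | succ m ih =>
    simp only [pvLastUp] at hj
    split at hj
    · omega
    · rename_i h
      rcases Nat.lt_or_ge j (m + 1) with hlt | hge
      · exact ih hj (by omega)
      · have hjm1 : j = m + 1 := by omega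
        subst hjm1
        rw [show ((m : Int) + 1) = ((m + 1 : Nat) : Int) by push_cast; ring,
          PySem.List.pyGetD_natCast] at h
        simpa using h

lemma pvAltTail_step (cs : List Char) (L m : Nat) (h : L + 1 < m) :
    pvAltTail cs L m = ('|' :: cs.take (m - 1)) ++ pvAltTail cs L (m - 1) := by
  cases m with
  | zero => omega
  | succ m => simp [pvAltTail, show ¬ (m + 1 ≤ L + 1) by omega]

lemma pvAltTail_base (cs : List Char) (L : Nat) : pvAltTail cs L (L + 1) = [] := by
  simp [pvAltTail]

-- last character of a nonempty take m cs is cs[m-1]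
lemma pvGetLast_take (cs : List Char) (m : Nat) (h1 : 1 ≤ m) (h2 : m ≤ cs.length) :
    PySem.List.pyGetD (cs.take m) (-1) ' ' = cs.getD (m - 1) ' ' := by
  have hne : cs.take m ≠ [] := by
    simp only [ne_eq, List.take_eq_nil_iff]
    rintro (h | h)
    · omega
    · subst h; simp at h2; omega
  rw [PySem.List.pyGetD_neg_one _ _ hne, List.getLast_eq_getElem]
  have hlen : (cs.take m).length = m := by simp; omega
  have hlt : m - 1 < (cs.take m).length := by omega
  rw [List.getElem_take]
  rw [List.getD_eq_getElem]
  · congr 1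
    omega
  · omega

-- A's inner loop with tmpstring = part[:m] contributes exactly pvAltTail
lemma pvLoopA_eq (cs : List Char) (h0 : PySem.Chars.isupper (cs.getD 0 ' ') = true)
    (fuel : List Char) :
    ∀ (m : Nat) (tr : List Char),
      pvLastUp cs (cs.length - 1) + 1 ≤ m → m ≤ cs.length →
      m - (pvLastUp cs (cs.length - 1) + 1) ≤ fuel.length →
      pvLoopA cs fuel tr (cs.take m) = tr ++ pvAltTail cs (pvLastUp cs (cs.length - 1)) m := by
  set L := pvLastUp cs (cs.length - 1) with hL
  induction fuel with
  | nil =>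
    intro m tr hLm hmn hfuel
    have hm : m = L + 1 := by simp at hfuel; omega
    subst hm
    simp [pvLoopA, pvAltTail_base]
  | cons x fuel ih =>
    intro m tr hLm hmn hfuel
    have h1m : 1 ≤ m := by omega
    rw [show pvLoopA cs (x :: fuel) tr (cs.take m) =
        (if PySem.Chars.isupper (PySem.List.pyGetD (cs.take m) (-1) ' ') then tr
         else pvLoopA cs fuel
           (tr ++ '|' :: PySem.List.slice cs (some 0) (some (((cs.take m).length : Int) - 1)))
           (PySem.List.slice cs (some 0) (some (((cs.take m).length : Int) - 1)))) from rfl]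
    rw [pvGetLast_take cs m h1m hmn]
    by_cases heq : m = L + 1
    · subst heq
      rw [show L + 1 - 1 = L from rfl, pvLastUp_upper cs (cs.length - 1) h0]
      simp [pvAltTail_base]
    · -- L + 1 < m, so cs[m-1] is not uppercase and the loop shortens the string
      have hlt : L + 1 < m := by omega
      have hfalse : PySem.Chars.isupper (cs.getD (m - 1) ' ') = false :=
        pvLastUp_max cs (cs.length - 1) (m - 1) (by omega) (by omega)
      rw [hfalse]
      simp only [Bool.false_eq_true, if_false]
      have hlen : (cs.take m).length = m := by simp; omega
      have hslice : PySem.List.slice cs (some 0) (some (((cs.take m).length : Int) - 1)) =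
          cs.take (m - 1) := by
        rw [hlen, PySem.List.slice_zero_start,
          show (m : Int) - 1 = ((m - 1 : Nat) : Int) by omega]
        exact PySem.List.slice_to_natCast cs (m - 1)
      rw [hslice, ih (m - 1) _ (by omega) (by omega) (by simp at hfuel ⊢; omega),
        pvAltTail_step cs L m hlt]
      simp

-- B's '|'.join of the descending prefixes equals the full word plus pvAltTail
lemma pvJoinB_eq (cs : List Char) (L : Nat) (m : Nat) (hLm : L + 1 ≤ m) :
    PySem.Chars.join ['|']
      ((PySem.List.pyRange (m : Int) (L : Int) (-1)).map
        (fun k => PySem.List.slice cs none (some k))) =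
    cs.take m ++ pvAltTail cs L m := by
  induction m, hLm using Nat.le_induction with
  | base =>
    rw [PySem.List.pyRange_neg_one_cons (by exact_mod_cast Nat.lt_succ_self L),
      show ((L + 1 : Nat) : Int) - 1 = (L : Int) by push_cast; ring,
      PySem.List.pyRange_neg_one_eq_nil (le_refl _)]
    rw [List.map_cons, List.map_nil, PySem.Chars.join_singleton,
      PySem.List.slice_to_natCast cs (L + 1), pvAltTail_base, List.append_nil]
  | succ m hm ih =>
    rw [PySem.List.pyRange_neg_one_cons (by exact_mod_cast by omega),
      show ((m + 1 : Nat) : Int) - 1 = (m : Int) by push_cast; ring]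
    obtain ⟨q, rest, hqr⟩ : ∃ q rest, PySem.List.pyRange (m : Int) (L : Int) (-1) = q :: rest :=
      ⟨_, _, PySem.List.pyRange_neg_one_cons (by exact_mod_cast by omega)⟩
    rw [hqr, List.map_cons, List.map_cons, PySem.Chars.join_cons_cons]
    have hmap : PySem.List.slice cs none (some q) ::
        List.map (fun k => PySem.List.slice cs none (some k)) rest =
        List.map (fun k => PySem.List.slice cs none (some k))
          (PySem.List.pyRange (m : Int) (L : Int) (-1)) := by
      rw [hqr]; rfl
    rw [hmap, ih, PySem.List.slice_to_natCast cs (m + 1),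
      pvAltTail_step cs L (m + 1) (by omega)]
    simp

-- the two per-part groups agree
lemma pvGroup_eq (part : List Char) : pvGroupA part = pvGroupB part := by
  unfold pvGroupA pvGroupB
  by_cases hup : PySem.Chars.isupper (PySem.List.pyGetD part 0 ' ') = true
  · rw [if_pos hup, if_pos hup]
    rw [PySem.List.pyGetD_zero] at hup
    have hne : part ≠ [] := by
      rintro rfl
      rw [show ([] : List Char).getD 0 ' ' = ' ' from rfl] at hup
      exact absurd hup (by decide)
    have h1 : 1 ≤ part.length := by
      cases part
      · exact absurd rfl hne
      · simp
    have hLle : pvLastUp part (part.length - 1) ≤ part.length - 1 := pvLastUp_le _ _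
    congr 1
    rw [show (pvLoopA part part part part = pvLoopA part part part (part.take part.length)) by
        rw [List.take_length]]
    rw [pvLoopA_eq part hup part part.length part (by omega) (le_refl _) (by omega)]
    rw [pvJoinB_eq part (pvLastUp part (part.length - 1)) part.length (by omega)]
    rw [List.take_length]
  · rw [if_neg hup, if_neg hup]

-- A accumulates result by repeated append; as a flattened map
lemma pvFoldA (l : List (List Char)) (acc : List Char) :
    l.foldl (fun res part => res ++ pvGroupA part ++ ['\\', 's', '+']) acc =
    acc ++ (l.map (fun p => pvGroupA p ++ ['\\', 's', '+'])).flatten := by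
  rw [show (fun res part => res ++ pvGroupA part ++ ['\\', 's', '+']) =
      (fun res part => res ++ (pvGroupA part ++ ['\\', 's', '+'])) by
    funext r p; rw [List.append_assoc]]
  rw [PySem.List.foldl_append_eq_flatMap, List.flatMap_def]

-- trimming the trailing '\s+' of A's accumulated result gives B's join
lemma pvTrim_eq (l : List (List Char)) :
    PySem.List.slice ((l.map (fun p => pvGroupA p ++ ['\\', 's', '+'])).flatten)
      none (some (-3)) =
    PySem.Chars.join ['\\', 's', '+'] (l.map pvGroupA) := by
  induction l with
  | nil => rfl
  | cons a rest ih =>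
    rw [PySem.List.slice_to_neg_ofNat _ 3 (by omega)]
    cases rest with
    | nil =>
      simp only [List.map_cons, List.map_nil, List.flatten_cons, List.flatten_nil,
        List.append_nil, PySem.Chars.join_singleton]
      rw [show (pvGroupA a ++ ['\\', 's', '+']).length - 3 = (pvGroupA a).length by
        simp]
      exact List.take_left
    | cons b rest2 =>
      rw [PySem.List.slice_to_neg_ofNat _ 3 (by omega)] at ih
      have h3 : 3 ≤ ((List.map (fun p => pvGroupA p ++ ['\\', 's', '+']) (b :: rest2)).flatten).length := by
        simp
        omega
      set X := (List.map (fun p => pvGroupA p ++ ['\\', 's', '+']) (b :: rest2)).flatten with hX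
      rw [List.map_cons, List.flatten_cons, ← hX]
      have hlen : ((pvGroupA a ++ ['\\', 's', '+']) ++ X).length - 3 =
          (pvGroupA a ++ ['\\', 's', '+']).length + (X.length - 3) := by
        simp
        omega
      rw [show (pvGroupA a ++ ['\\', 's', '+']) ++ X =
          (pvGroupA a ++ ['\\', 's', '+']) ++ X from rfl, hlen, List.take_append,
        List.take_of_length_le (by omega),
        show (pvGroupA a ++ ['\\', 's', '+']).length + (X.length - 3) -
          (pvGroupA a ++ ['\\', 's', '+']).length = X.length - 3 by omega, ih,
        List.map_cons, List.map_cons]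
      rw [show pvGroupA a ++ ['\\', 's', '+'] ++
          PySem.Chars.join ['\\', 's', '+'] (pvGroupA b :: List.map pvGroupA rest2) =
          pvGroupA a ++ ['\\', 's', '+'] ++
          PySem.Chars.join ['\\', 's', '+'] (pvGroupA b :: List.map pvGroupA rest2) from rfl,
        ← PySem.Chars.join_cons_cons, List.map_cons]

lemma pvCore_eq (cs : List Char) : pvCoreA cs = pvCoreB cs := by
  unfold pvCoreA pvCoreB
  simp only [pvFoldA, List.nil_append]
  rw [pvTrim_eq, show pvGroupA = pvGroupB from funext pvGroup_eq]

-- ===== VERDICT (by name: the statement is the Claim_ definition above) =====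
theorem regexpgenerator_spec : Claim_equal_regexpgenerator := by
  intro regexp _ _
  unfold Spec_regexpgenerator regexpgenerator regexpgenerator_alt
  rw [pvCore_eq]
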